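-- pv_equiv track=rewrite | github.com/BekkerBarnabasCkik/Python | Beolvasas/rendel.py | miniKivalaszas2
-- ===== SOURCE A (Python) =====
-- def miniKivalaszas2(adatok, adottElem, poz):
--     mini=poz
--     i=poz
--     while i<len(adatok) and adatok[i][1]==adottElem:
--         if adatok[i][2]<adatok[mini][2]:
--             mini=i
--         i+=1
--
--     return mini
-- ===== SOURCE B (Python) =====
-- def miniKivalaszas2(adatok, adottElem, poz):
--     end = poz
--     while end < len(adatok) and adatok[end][1] == adottElem:
--         end += 1
--     if end == poz:
--         return poz
--     return min(range(poz, end), key=lambda j: adatok[j][2])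
-- ===== Notes on version B (the rewrite author's own statement) =====
-- stated objective: idiomatic
-- what changed: B first finds the end of the matching run with a plain boundary scan and then takes the argmin with the built-in min(range(poz,end), key=...) (first minimum on ties), instead of tracking a running minimum index inside the scan loop.
import Mathlib
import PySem

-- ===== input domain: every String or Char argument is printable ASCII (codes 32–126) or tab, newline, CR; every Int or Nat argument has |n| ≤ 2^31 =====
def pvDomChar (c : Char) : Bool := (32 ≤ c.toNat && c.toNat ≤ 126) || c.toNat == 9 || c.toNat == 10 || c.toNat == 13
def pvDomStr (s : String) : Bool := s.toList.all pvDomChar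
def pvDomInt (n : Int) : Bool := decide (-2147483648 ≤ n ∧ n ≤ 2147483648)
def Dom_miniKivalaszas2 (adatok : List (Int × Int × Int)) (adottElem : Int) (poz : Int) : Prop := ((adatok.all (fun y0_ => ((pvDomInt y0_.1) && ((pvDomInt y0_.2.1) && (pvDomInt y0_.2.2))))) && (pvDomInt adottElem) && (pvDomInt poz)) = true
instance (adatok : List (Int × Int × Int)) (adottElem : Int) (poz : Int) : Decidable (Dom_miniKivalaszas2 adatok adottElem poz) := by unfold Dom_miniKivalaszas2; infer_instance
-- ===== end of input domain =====

-- B separates the boundary scan (finding the end of the matching run) from a built-in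
-- first-minimum reduction over the index range, instead of tracking a running minimum
-- index inside the scan loop (objective: idiomatic; same cost).

-- ===== PORT A =====
-- A's while loop 'while i < len(adatok) and adatok[i][1] == adottElem', state (mini, i);
-- the fuel ((len - i).toNat at entry, decremented per step) encodes the 'i < len' test:
-- it is 0 exactly when i has reached len (or started past it).
def pvALoop (adatok : List (Int × Int × Int)) (adottElem : Int) : Nat → Int → Int → Int
  | 0, mini, _ => mini
  | fuel + 1, mini, i =>
      if (PySem.List.pyGetD adatok i (0, 0, 0)).2.1 = adottElem then
        pvALoop adatok adottElem fuel
          (if (PySem.List.pyGetD adatok i (0, 0, 0)).2.2 <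
              (PySem.List.pyGetD adatok mini (0, 0, 0)).2.2 then i else mini)
          (i + 1)
      else mini

def miniKivalaszas2 (adatok : List (Int × Int × Int)) (adottElem : Int) (poz : Int) : Int :=
  pvALoop adatok adottElem ((adatok.length : Int) - poz).toNat poz poz

-- ===== PORT B =====
-- boundary scan: first index ≥ poz failing 'end < len(adatok) and adatok[end][1] == adottElem'
-- (same fuel encoding of the 'end < len' test)
def pvEndScan (adatok : List (Int × Int × Int)) (adottElem : Int) : Nat → Int → Int
  | 0, i => i
  | fuel + 1, i =>
      if (PySem.List.pyGetD adatok i (0, 0, 0)).2.1 = adottElem then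
        pvEndScan adatok adottElem fuel (i + 1)
      else i

def miniKivalaszas2_alt (adatok : List (Int × Int × Int)) (adottElem : Int) (poz : Int) : Int :=
  let e := pvEndScan adatok adottElem ((adatok.length : Int) - poz).toNat poz
  if e = poz then poz
  else
    (PySem.List.min? (PySem.List.pyRange poz e 1)
      (fun j => (PySem.List.pyGetD adatok j (0, 0, 0)).2.2)).getD poz

-- ===== PRECONDITION & SPEC =====
-- Pre_ excludes exactly the inputs where Python A raises IndexError: poz < -len(adatok)
-- makes the first access adatok[poz] go out of range (B raises there too).
def Pre_miniKivalaszas2 (adatok : List (Int × Int × Int)) (adottElem : Int) (poz : Int) : Prop :=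
  -(adatok.length : Int) ≤ poz
instance (adatok : List (Int × Int × Int)) (adottElem : Int) (poz : Int) : Decidable (Pre_miniKivalaszas2 adatok adottElem poz) := by unfold Pre_miniKivalaszas2; infer_instance

def pvWitness_miniKivalaszas2 : (List (Int × Int × Int)) × Int × Int := ([(1, 2, 5), (1, 2, 3)], 2, 0)

def Spec_miniKivalaszas2 (adatok : List (Int × Int × Int)) (adottElem : Int) (poz : Int) (out : Int) : Prop := out = miniKivalaszas2_alt adatok adottElem poz
instance (adatok : List (Int × Int × Int)) (adottElem : Int) (poz : Int) (out : Int) : Decidable (Spec_miniKivalaszas2 adatok adottElem poz out) := by unfold Spec_miniKivalaszas2; infer_instance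

-- ===== CLAIM (what is proved, stated in full; the proofs are below) =====
def Claim_equal_miniKivalaszas2 : Prop := ∀ (adatok : List (Int × Int × Int)) (adottElem : Int) (poz : Int), Dom_miniKivalaszas2 adatok adottElem poz → Pre_miniKivalaszas2 adatok adottElem poz → Spec_miniKivalaszas2 adatok adottElem poz (miniKivalaszas2 adatok adottElem poz)

-- ===== LEMMAS AND PROOFS =====

-- the folding step of Python's min with this key (identical to PySem.List.min?'s folder)
def pvStep (adatok : List (Int × Int × Int)) : Option Int → Int → Option Int :=
  fun acc x =>
    match acc with
    | none => some x
    | some m =>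
        if (PySem.List.pyGetD adatok x (0, 0, 0)).2.2 <
           (PySem.List.pyGetD adatok m (0, 0, 0)).2.2 then some x else some m

theorem pvMin?_eq_foldl (adatok : List (Int × Int × Int)) (xs : List Int) :
    PySem.List.min? xs (fun j => (PySem.List.pyGetD adatok j (0, 0, 0)).2.2) =
      xs.foldl (pvStep adatok) none := by
  simp only [PySem.List.min?]
  congr 1
  funext acc x
  cases acc <;> rfl

theorem pvEndScan_ge (adatok : List (Int × Int × Int)) (adottElem : Int) (fuel : Nat) :
    ∀ i : Int, i ≤ pvEndScan adatok adottElem fuel i := by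
  induction fuel with
  | zero => intro i; simp [pvEndScan]
  | succ f ih =>
      intro i
      rw [pvEndScan]
      split
      · have := ih (i + 1); omega
      · exact le_rfl

theorem pvALoop_eq (adatok : List (Int × Int × Int)) (adottElem : Int) (fuel : Nat) :
    ∀ mini i d : Int,
      pvALoop adatok adottElem fuel mini i =
        ((PySem.List.pyRange i (pvEndScan adatok adottElem fuel i) 1).foldl
          (pvStep adatok) (some mini)).getD d := by
  induction fuel with
  | zero =>
      intro mini i d
      rw [pvALoop, pvEndScan, PySem.List.pyRange_one_eq_nil le_rfl]
      simp
  | succ f ih =>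
      intro mini i d
      rw [pvALoop, pvEndScan]
      by_cases h : (PySem.List.pyGetD adatok i (0, 0, 0)).2.1 = adottElem
      · rw [if_pos h, if_pos h, ih]
        have hcons : i < pvEndScan adatok adottElem f (i + 1) := by
          have := pvEndScan_ge adatok adottElem f (i + 1); omega
        rw [PySem.List.pyRange_one_cons hcons, List.foldl_cons]
        have hfirst : pvStep adatok (some mini) i =
            some (if (PySem.List.pyGetD adatok i (0, 0, 0)).2.2 <
                (PySem.List.pyGetD adatok mini (0, 0, 0)).2.2 then i else mini) := by
          simp only [pvStep]
          split <;> rfl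
        rw [hfirst]
      · rw [if_neg h, if_neg h, PySem.List.pyRange_one_eq_nil le_rfl]
        simp

-- ===== VERDICT (by name: the statement is the Claim_ definition above) =====
theorem miniKivalaszas2_spec : Claim_equal_miniKivalaszas2 := by
  intro adatok adottElem poz _hDom _hPre
  unfold Spec_miniKivalaszas2 miniKivalaszas2 miniKivalaszas2_alt
  set e := pvEndScan adatok adottElem ((adatok.length : Int) - poz).toNat poz with hE
  by_cases he : e = poz
  · rw [if_pos he, pvALoop_eq adatok adottElem _ poz poz poz, ← hE, he,
      PySem.List.pyRange_one_eq_nil le_rfl]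
    simp
  · rw [if_neg he, pvALoop_eq adatok adottElem _ poz poz poz, ← hE]
    have hlt : poz < e := lt_of_le_of_ne (pvEndScan_ge _ _ _ _) (Ne.symm he)
    rw [PySem.List.pyRange_one_cons hlt, pvMin?_eq_foldl, List.foldl_cons, List.foldl_cons]
    have hstep : pvStep adatok (some poz) poz = some poz := by
      simp [pvStep]
    have hstep0 : pvStep adatok none poz = some poz := rfl
    rw [hstep, hstep0]
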